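-- pv_equiv track=rewrite | github.com/thoth-station/user-api | thoth/user_api/parsing/handlers/yum.py | _parse_yum_table_heading
-- ===== SOURCE A (Python) =====
-- import typing
--
-- def _parse_yum_table_heading(lines: typing.List[str], start_index: int) -> int:
--     """Parse yum table heading, return increment for which there should be done proceeding."""  # Ignore PycodestyleBear (E501)
--     header_items = ['Package', 'Arch', 'Version', 'Repository', 'Size']
--     heading = [item for item in lines[start_index].split(' ') if item]
--     if heading != header_items:
--         # yum can break table into multiple lines for some
--         # reason - this can be inconsistent
--         # regardless of terminal size in a single run
--         second_line = [
--             item for item in lines[start_index + 1].split(' ') if item]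
--         heading.extend(second_line)
--         if heading != header_items:
--             return 0
--
--         return 2
--
--     return 1
-- ===== SOURCE B (Python) =====
-- def _parse_yum_table_heading(lines, start_index):
--     """Parse yum table heading, return increment for which there should be done proceeding."""
--     HEADER = ('Package', 'Arch', 'Version', 'Repository', 'Size')
--     # streaming state machine: match each non-empty token against the next expected header word
--     i, ok = 0, True
--     for tok in lines[start_index].split(' '):
--         if tok:
--             if ok and i < 5 and tok == HEADER[i]:
--                 i += 1
--             else:
--                 ok = False
--     if ok and i == 5:
--         return 1
--     for tok in lines[start_index + 1].split(' '):
--         if tok: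
--             if ok and i < 5 and tok == HEADER[i]:
--                 i += 1
--             else:
--                 ok = False
--     return 2 if ok and i == 5 else 0
-- ===== Notes on version B (the rewrite author's own statement) =====
-- stated objective: alternative
-- what changed: B is a streaming state machine: it folds over the raw split items of each line with a (matched-count, ok) accumulator, matching every non-empty token in place against the next expected header word, instead of building filtered token lists, concatenating them and comparing whole lists against the header.
import Mathlib
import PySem

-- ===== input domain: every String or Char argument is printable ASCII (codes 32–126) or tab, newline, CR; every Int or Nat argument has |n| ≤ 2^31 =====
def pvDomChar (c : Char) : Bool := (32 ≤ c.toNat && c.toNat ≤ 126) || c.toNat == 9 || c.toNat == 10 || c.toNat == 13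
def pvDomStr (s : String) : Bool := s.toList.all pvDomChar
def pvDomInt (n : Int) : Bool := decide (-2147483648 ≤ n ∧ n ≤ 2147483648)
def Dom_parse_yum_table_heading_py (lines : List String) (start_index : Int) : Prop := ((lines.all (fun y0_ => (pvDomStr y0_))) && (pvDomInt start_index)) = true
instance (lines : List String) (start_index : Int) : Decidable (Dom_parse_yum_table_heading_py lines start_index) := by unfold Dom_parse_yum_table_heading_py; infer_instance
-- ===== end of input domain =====

-- B replaces A's build-filtered-token-lists-and-compare by a streaming state machine that folds
-- over the raw split items with a (matched-count, ok) accumulator (alternative decomposition, same cost).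
-- ===== PORT A =====
-- [raw items of lines[i].split(' ')]
def pvRawToks (s : String) : List String := (PySem.Str.split? s " ").getD []
-- [A's comprehension: split on ' ' and drop empty items]
def pvToks (s : String) : List String := (pvRawToks s).filter (· != "")

def pvHeader : List String := ["Package", "Arch", "Version", "Repository", "Size"]

def parse_yum_table_heading_py (lines : List String) (start_index : Int) : Int :=
  match PySem.List.pyGet? lines start_index with
  | none => 0  -- IndexError: excluded by Pre_
  | some l0 =>
    let heading := pvToks l0
    if heading ≠ pvHeader then
      match PySem.List.pyGet? lines (start_index + 1) with
      | none => 0  -- IndexError: excluded by Pre_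
      | some l1 =>
        let heading2 := heading ++ pvToks l1
        if heading2 ≠ pvHeader then 0 else 2
    else 1

-- ===== PORT B =====
-- B's loop body: skip empty tokens; otherwise match against the next expected header word.
-- (HEADER[i] is only read under the guard i < 5, so the total getD is exact.)
def pvStep (st : Nat × Bool) (t : String) : Nat × Bool :=
  if t == "" then st
  else if st.2 && decide (st.1 < 5) && (t == pvHeader.getD st.1 "") then (st.1 + 1, st.2)
  else (st.1, false)

def pvConsume (ts : List String) (st : Nat × Bool) : Nat × Bool := ts.foldl pvStep st

def parse_yum_table_heading_py_alt (lines : List String) (start_index : Int) : Int :=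
  match PySem.List.pyGet? lines start_index with
  | none => 0  -- IndexError: excluded by Pre_
  | some l0 =>
    let st1 := pvConsume (pvRawToks l0) (0, true)
    if st1.2 && st1.1 == 5 then 1
    else
      match PySem.List.pyGet? lines (start_index + 1) with
      | none => 0  -- IndexError: excluded by Pre_
      | some l1 =>
        let st2 := pvConsume (pvRawToks l1) st1
        if st2.2 && st2.1 == 5 then 2 else 0

-- ===== PRECONDITION & SPEC =====
-- Pre_ excludes exactly the inputs on which A raises IndexError: start_index out of range,
-- or (first line's tokens not the header) and start_index+1 out of range.
def Pre_parse_yum_table_heading_py (lines : List String) (start_index : Int) : Prop :=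
  ((PySem.List.pyGet? lines start_index).isSome
    && (pvToks ((PySem.List.pyGet? lines start_index).getD "") == pvHeader
        || (PySem.List.pyGet? lines (start_index + 1)).isSome)) = true
instance (lines : List String) (start_index : Int) : Decidable (Pre_parse_yum_table_heading_py lines start_index) := by unfold Pre_parse_yum_table_heading_py; infer_instance

def pvWitness_parse_yum_table_heading_py : List String × Int :=
  (["Package   Arch Version  Repository Size"], 0)
def Spec_parse_yum_table_heading_py (lines : List String) (start_index : Int) (out : Int) : Prop := out = parse_yum_table_heading_py_alt lines start_index
instance (lines : List String) (start_index : Int) (out : Int) : Decidable (Spec_parse_yum_table_heading_py lines start_index out) := by unfold Spec_parse_yum_table_heading_py; infer_instance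

-- ===== CLAIM (what is proved, stated in full; the proofs are below) =====
def Claim_equal_parse_yum_table_heading_py : Prop := ∀ (lines : List String) (start_index : Int), Dom_parse_yum_table_heading_py lines start_index → Pre_parse_yum_table_heading_py lines start_index → Spec_parse_yum_table_heading_py lines start_index (parse_yum_table_heading_py lines start_index)

-- ===== LEMMAS AND PROOFS =====

-- empty tokens are skipped, so folding the raw items equals folding the filtered items
theorem pv_consume_filter (ts : List String) (st : Nat × Bool) :
    pvConsume ts st = pvConsume (ts.filter (· != "")) st := by
  induction ts generalizing st with
  | nil => rfl
  | cons t ts ih =>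
    by_cases h : t = ""
    · simp only [pvConsume, List.foldl, List.filter_cons, h]
      rw [show (("" : String) != "") = false from rfl]
      simp only [pvStep, if_pos (by rfl : (("" : String) == "") = true)]
      exact ih st
    · simp only [pvConsume, List.foldl, List.filter]
      have : (t != "") = true := by simpa using h
      rw [this]
      exact ih _

-- the state machine reaches (5, true) iff the token stream is exactly the remaining header words
theorem pv_consume_main (ts : List String) (i : Nat) (h5 : i ≤ 5)
    (hne : ∀ t ∈ ts, t ≠ "") :
    pvConsume ts (i, true) = (5, true) ↔ ts = pvHeader.drop i := by
  induction ts generalizing i with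
  | nil =>
    simp only [pvConsume, List.foldl]
    constructor
    · rintro h; have : i = 5 := by simpa [Prod.ext_iff] using h
      simp [this, pvHeader]
    · intro h
      have hlen : (pvHeader.drop i).length = 5 - i := by simp [pvHeader]
      have : (5 : Nat) - i = 0 := by rw [← hlen, ← h]; rfl
      have : i = 5 := by omega
      simp [this]
  | cons t ts ih =>
    have htne : t ≠ "" := hne t (by simp)
    have htb : (t == "") = false := by simpa using htne
    by_cases hi : i < 5
    · have hdrop : pvHeader.drop i = pvHeader[i] :: pvHeader.drop (i + 1) :=
        List.drop_eq_getElem_cons (by simpa [pvHeader] using hi)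
      have hget? : pvHeader[i]? = some pvHeader[i] :=
        List.getElem?_eq_getElem (by simpa [pvHeader] using hi)
      by_cases ht : t = pvHeader[i]
      · have htb' : ¬ pvHeader[i] = "" := ht ▸ htne
        have hstep : pvStep (i, true) t = (i + 1, true) := by
          simp [pvStep, htb', hi, List.getD, hget?, ht]
        have : pvConsume (t :: ts) (i, true) = pvConsume ts (i + 1, true) := by
          simp [pvConsume, List.foldl, hstep]
        rw [this, ih (i + 1) (by omega) (fun x hx => hne x (by simp [hx])), hdrop, ht]
        simp only [List.cons.injEq, true_and]
      · have hstep : pvStep (i, true) t = (i, false) := by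
          have hne' : (t == pvHeader[i]?.getD "") = false := by
            simp only [hget?, Option.getD_some]
            simpa using ht
          simp [pvStep, htb, List.getD, hne']
        have hfalse : ∀ us j, pvConsume us (j, false) = (j, false) := by
          intro us
          induction us with
          | nil => intro j; rfl
          | cons u us ihu =>
            intro j
            by_cases hu : u = "" <;>
              simp [pvConsume, List.foldl, pvStep, hu] at * <;> exact ihu j
        rw [show pvConsume (t :: ts) (i, true) = pvConsume ts (i, false) from by
          simp [pvConsume, List.foldl, hstep]]
        rw [hfalse]
        simp only [Prod.ext_iff]
        constructor
        · rintro ⟨_, h⟩; exact absurd h (by simp)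
        · intro h; rw [hdrop] at h
          exact absurd (List.cons.injEq .. ▸ h).1 ht
    · have hi5 : i = 5 := by omega
      have : pvHeader.drop i = [] := by simp [hi5, pvHeader]
      rw [this]
      have hstep : pvStep (i, true) t = (i, false) := by
        simp [pvStep, htb, hi5]
      have hfalse : ∀ us j, pvConsume us (j, false) = (j, false) := by
        intro us
        induction us with
        | nil => intro j; rfl
        | cons u us ihu =>
          intro j
          by_cases hu : u = "" <;>
            simp [pvConsume, List.foldl, pvStep, hu] at * <;> exact ihu j
      rw [show pvConsume (t :: ts) (i, true) = pvConsume ts (i, false) from by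
        simp [pvConsume, List.foldl, hstep]]
      rw [hfalse]
      simp [Prod.ext_iff]

theorem pv_toks_ne (s : String) : ∀ t ∈ pvToks s, t ≠ "" := by
  intro t ht
  have := List.of_mem_filter ht
  simpa using this

theorem pv_pair_cond (st : Nat × Bool) : (st.2 && st.1 == 5) = true ↔ st = (5, true) := by
  cases st with
  | mk a b => cases b <;> simp [Prod.ext_iff]

-- ===== VERDICT (by name: the statement is the Claim_ definition above) =====
theorem parse_yum_table_heading_py_spec : Claim_equal_parse_yum_table_heading_py := by
  intro lines start_index _ hpre
  unfold Pre_parse_yum_table_heading_py at hpre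
  unfold Spec_parse_yum_table_heading_py parse_yum_table_heading_py parse_yum_table_heading_py_alt
  cases h0 : PySem.List.pyGet? lines start_index with
  | none => simp [h0] at hpre
  | some l0 =>
    rw [h0] at hpre
    simp only [Option.isSome_some, Option.getD_some, Bool.true_and, Bool.or_eq_true,
      beq_iff_eq, Option.isSome_iff_exists] at hpre
    have hst1 : pvConsume (pvRawToks l0) (0, true) = pvConsume (pvToks l0) (0, true) :=
      pv_consume_filter _ _
    have h1iff : pvConsume (pvToks l0) (0, true) = (5, true) ↔ pvToks l0 = pvHeader := by
      simpa using pv_consume_main (pvToks l0) 0 (by omega) (pv_toks_ne l0)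
    by_cases hh : pvToks l0 = pvHeader
    · have : (( pvConsume (pvRawToks l0) (0, true)).2 && (pvConsume (pvRawToks l0) (0, true)).1 == 5) = true := by
        rw [pv_pair_cond, hst1]; exact h1iff.2 hh
      simp [hh, this]
    · have hcond1 : ((pvConsume (pvRawToks l0) (0, true)).2 && (pvConsume (pvRawToks l0) (0, true)).1 == 5) = false := by
        rw [Bool.eq_false_iff]
        intro hc
        have hc' := (pv_pair_cond (pvConsume (pvRawToks l0) (0, true))).1 hc
        rw [hst1] at hc'
        exact hh (h1iff.1 hc')
      simp only [hh, ne_eq, not_false_iff, if_true, hcond1, Bool.false_eq_true, if_false]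
      cases h1 : PySem.List.pyGet? lines (start_index + 1) with
      | none => rfl
      | some l1 =>
        have hst2 : pvConsume (pvRawToks l1) (pvConsume (pvRawToks l0) (0, true))
            = pvConsume (pvToks l0 ++ pvToks l1) (0, true) := by
          rw [hst1, pv_consume_filter (pvRawToks l1)]
          simp [pvConsume, List.foldl_append, pvToks]
        have h2iff : pvConsume (pvToks l0 ++ pvToks l1) (0, true) = (5, true)
            ↔ pvToks l0 ++ pvToks l1 = pvHeader := by
          simpa using pv_consume_main (pvToks l0 ++ pvToks l1) 0 (by omega)
            (by intro t ht
                rcases List.mem_append.1 ht with h | h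
                · exact pv_toks_ne l0 t h
                · exact pv_toks_ne l1 t h)
        by_cases hc : pvToks l0 ++ pvToks l1 = pvHeader
        · have : ((pvConsume (pvRawToks l1) (pvConsume (pvRawToks l0) (0, true))).2
              && (pvConsume (pvRawToks l1) (pvConsume (pvRawToks l0) (0, true))).1 == 5) = true := by
            rw [pv_pair_cond, hst2]; exact h2iff.2 hc
          simp [hc, this]
        · have : ((pvConsume (pvRawToks l1) (pvConsume (pvRawToks l0) (0, true))).2
              && (pvConsume (pvRawToks l1) (pvConsume (pvRawToks l0) (0, true))).1 == 5) = false := by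
            rw [Bool.eq_false_iff]
            intro h
            have h' := (pv_pair_cond (pvConsume (pvRawToks l1) (pvConsume (pvRawToks l0) (0, true)))).1 h
            rw [hst2] at h'
            exact hc (h2iff.1 h')
          simp [hc, this]
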